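-- pv_equiv track=rewrite | github.com/tycyd/codeforces | permutation/1391C Cyclic Permutations.py | cyclic_permutations2
-- ===== SOURCE A (Python) =====
-- MOD = 10**9+7
--
-- def cyclic_permutations2(n):
--     a = 1
--     f = 1
--     for i in range(1, n):
--         a *= 2
--         f *= i
--         a %= MOD
--         f %= MOD
--     f *= n
--     f %= MOD
--     res = (f - a) % MOD
--
--     return res
-- ===== SOURCE B (Python) =====
-- MOD = 10**9+7
--
-- def cyclic_permutations2(n):
--     # n! - 2^(n-1) modulo 1e9+7: divide-and-conquer range product for the
--     # factorial, recursive squaring for the power of two.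
--     return (_prod_range(1, n + 1) - _pow2(n - 1)) % MOD
--
-- def _prod_range(lo, hi):
--     # product of the integers in [lo, hi) modulo MOD, by binary splitting
--     if hi - lo <= 0:
--         return 1
--     if hi - lo == 1:
--         return lo % MOD
--     mid = (lo + hi) // 2
--     return _prod_range(lo, mid) * _prod_range(mid, hi) % MOD
--
-- def _pow2(e):
--     # 2**e modulo MOD by recursive squaring
--     if e == 0:
--         return 1
--     h = _pow2(e // 2)
--     h = h * h % MOD
--     return h * 2 % MOD if e % 2 else h
-- ===== Notes on version B (the rewrite author's own statement) =====
-- stated objective: alternative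
-- what changed: A's single fused loop that doubles the power and accumulates the factorial together is replaced by two recursive divide-and-conquer computations: a binary-splitting range product for n! and recursive squaring for 2^(n-1); Pre_ excludes n <= 0, where A's value (n-1) mod p is an empty-loop artefact and B's recursive power does not terminate.
-- outside the precondition, e.g. on cyclic_permutations2(0): A returns 1000000006, B raises RecursionError; on cyclic_permutations2(-5): A returns 1000000001, B raises RecursionError
import Mathlib
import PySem

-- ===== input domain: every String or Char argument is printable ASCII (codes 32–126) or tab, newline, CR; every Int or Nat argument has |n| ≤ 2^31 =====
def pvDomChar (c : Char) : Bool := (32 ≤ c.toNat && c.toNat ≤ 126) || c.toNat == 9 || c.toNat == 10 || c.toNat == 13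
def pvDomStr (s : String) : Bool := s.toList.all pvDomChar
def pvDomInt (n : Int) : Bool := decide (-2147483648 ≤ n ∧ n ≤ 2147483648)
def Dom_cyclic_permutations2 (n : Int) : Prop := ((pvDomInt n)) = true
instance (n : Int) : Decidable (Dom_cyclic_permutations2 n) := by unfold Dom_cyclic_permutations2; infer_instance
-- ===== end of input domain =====

-- B computes n! by a divide-and-conquer range product and 2^(n-1) by recursive
-- squaring, replacing A's fused linear doubling/factorial loop (objective: alternative).

-- ===== PORT A =====
def cyclic_permutations2 (n : Int) : Int :=
  let st := (PySem.List.pyRange 1 n 1).foldl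
    (fun (p : Int × Int) i =>
      (PySem.Int.mod (p.1 * 2) 1000000007, PySem.Int.mod (p.2 * i) 1000000007))
    (1, 1)
  let f := PySem.Int.mod (st.2 * n) 1000000007
  PySem.Int.mod (f - st.1) 1000000007

-- ===== PORT B =====
-- _prod_range: product of the integers in [lo, hi) mod MOD by binary splitting
def pvProdRange (lo hi : Int) : Int :=
  if hi - lo ≤ 0 then 1
  else if hi - lo = 1 then PySem.Int.mod lo 1000000007
  else
    let mid := PySem.Int.floordiv (lo + hi) 2
    PySem.Int.mod (pvProdRange lo mid * pvProdRange mid hi) 1000000007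
termination_by (hi - lo).toNat
decreasing_by
  all_goals rw [PySem.Int.floordiv_eq_ediv_of_pos (by norm_num)]; omega

-- _pow2: 2^e mod MOD by recursive squaring.  The Python recursion terminates only for
-- e ≥ 0 (Pre_ guarantees the call site passes n - 1 ≥ 0), so the exponent is a Nat here.
def pvPow2 (e : Nat) : Int :=
  if e = 0 then 1
  else
    let h := pvPow2 (e / 2)
    let h2 := PySem.Int.mod (h * h) 1000000007
    if e % 2 = 1 then PySem.Int.mod (h2 * 2) 1000000007 else h2
termination_by e
decreasing_by omega

def cyclic_permutations2_alt (n : Int) : Int :=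
  PySem.Int.mod (pvProdRange 1 (n + 1) - pvPow2 (n - 1).toNat) 1000000007

-- ===== PRECONDITION & SPEC =====
-- Pre_ excludes n ≤ 0, where A returns (n-1) mod p — an artefact of its unrun loop
-- (f = n, a = 1) — and B's recursive power of two does not terminate (RecursionError).
def Pre_cyclic_permutations2 (n : Int) : Prop := 1 ≤ n
instance (n : Int) : Decidable (Pre_cyclic_permutations2 n) := by unfold Pre_cyclic_permutations2; infer_instance
def pvWitness_cyclic_permutations2 : Int := 3

def Spec_cyclic_permutations2 (n : Int) (out : Int) : Prop := out = cyclic_permutations2_alt n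
instance (n : Int) (out : Int) : Decidable (Spec_cyclic_permutations2 n out) := by unfold Spec_cyclic_permutations2; infer_instance

-- ===== CLAIM (what is proved, stated in full; the proofs are below) =====
def Claim_equal_cyclic_permutations2 : Prop := ∀ (n : Int), Dom_cyclic_permutations2 n → Pre_cyclic_permutations2 n → Spec_cyclic_permutations2 n (cyclic_permutations2 n)

-- ===== LEMMAS AND PROOFS =====

theorem pv_mod_emod (x : Int) : PySem.Int.mod x 1000000007 = x % 1000000007 :=
  PySem.Int.mod_eq_emod_of_pos (by norm_num)

theorem pv_mulmod (x y : Int) : (x % 1000000007 * y) % 1000000007 = x * y % 1000000007 := by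
  simp [Int.mul_emod]

-- A's loop over range(1, k+1) yields (2^k mod M, k! mod M)
theorem pv_foldA (k : Nat) :
    (PySem.List.pyRange 1 ((k : Int) + 1) 1).foldl
      (fun (p : Int × Int) i =>
        (PySem.Int.mod (p.1 * 2) 1000000007, PySem.Int.mod (p.2 * i) 1000000007))
      (1, 1)
    = ((2 : Int) ^ k % 1000000007, (Nat.factorial k : Int) % 1000000007) := by
  induction k with
  | zero =>
      rw [PySem.List.pyRange_one_eq_nil (by norm_num)]
      norm_num [Nat.factorial]
  | succ k ih =>
      push_cast
      rw [PySem.List.pyRange_one_succ_right (a := 1) (b := (k : Int) + 1) (by omega), List.foldl_append]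
      push_cast at ih
      rw [ih]
      simp only [List.foldl_cons, List.foldl_nil, pv_mod_emod]
      simp only [Prod.mk.injEq]
      constructor
      · rw [pv_mulmod]; ring_nf
      · rw [pv_mulmod, Nat.factorial_succ]; push_cast; ring_nf

-- the binary-splitting product is the plain range product, mod M
theorem pv_prodRange_eq (lo hi : Int) :
    pvProdRange lo hi = (PySem.List.pyRange lo hi 1).prod % 1000000007 := by
  induction hk : (hi - lo).toNat using Nat.strong_induction_on generalizing lo hi with
  | _ k ih =>
    rw [pvProdRange]
    split_ifs with h0 h1
    · rw [PySem.List.pyRange_one_eq_nil (by omega)]; norm_num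
    · have : hi = lo + 1 := by omega
      subst this
      rw [PySem.List.pyRange_one_singleton, pv_mod_emod]
      simp
    · dsimp only
      have hmid := PySem.Int.floordiv_eq_ediv_of_pos (a := lo + hi) (b := 2) (by norm_num)
      set mid := PySem.Int.floordiv (lo + hi) 2 with hm
      have hb1 : lo ≤ mid := by omega
      have hb2 : mid ≤ hi := by omega
      rw [ih (mid - lo).toNat (by omega) lo mid rfl,
          ih (hi - mid).toNat (by omega) mid hi rfl,
          pv_mod_emod, ← Int.mul_emod,
          PySem.List.pyRange_one_append lo mid hi hb1 hb2, List.prod_append]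

-- recursive squaring computes 2^e mod M
theorem pv_pow2_eq (e : Nat) : pvPow2 e = (2 : Int) ^ e % 1000000007 := by
  induction e using Nat.strong_induction_on with
  | _ e ih =>
    rw [pvPow2]
    split_ifs with h0 hpar
    · subst h0; norm_num
    · rw [ih (e / 2) (by omega)]
      dsimp only
      have hx : ((2 : Int) ^ (e / 2) % 1000000007 * ((2 : Int) ^ (e / 2) % 1000000007))
          % 1000000007 = (2 : Int) ^ (e / 2 + e / 2) % 1000000007 := by
        rw [← Int.mul_emod, ← pow_add]
      rw [pv_mod_emod, pv_mod_emod, hx, pv_mulmod, ← pow_succ]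
      have he : e / 2 + e / 2 + 1 = e := by omega
      rw [he]
    · rw [ih (e / 2) (by omega)]
      dsimp only
      have hx : ((2 : Int) ^ (e / 2) % 1000000007 * ((2 : Int) ^ (e / 2) % 1000000007))
          % 1000000007 = (2 : Int) ^ (e / 2 + e / 2) % 1000000007 := by
        rw [← Int.mul_emod, ← pow_add]
      rw [pv_mod_emod, hx]
      have he : e / 2 + e / 2 = e := by omega
      rw [he]

-- the range product [1, m+1) is m!
theorem pv_range_factorial (m : Nat) :
    (PySem.List.pyRange 1 ((m : Int) + 1) 1).prod = (Nat.factorial m : Int) := by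
  induction m with
  | zero =>
      rw [PySem.List.pyRange_one_eq_nil (by norm_num)]
      norm_num [Nat.factorial]
  | succ m ih =>
      push_cast
      rw [PySem.List.pyRange_one_succ_right (a := 1) (b := (m : Int) + 1) (by omega),
          List.prod_append]
      push_cast at ih
      rw [ih]
      simp [Nat.factorial_succ]
      ring_nf

-- ===== VERDICT (by name: the statement is the Claim_ definition above) =====
theorem cyclic_permutations2_spec : Claim_equal_cyclic_permutations2 := by
  intro n _ hpre
  unfold Spec_cyclic_permutations2 cyclic_permutations2 cyclic_permutations2_alt
  unfold Pre_cyclic_permutations2 at hpre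
  lift n to Nat using (by omega) with m
  obtain ⟨k, rfl⟩ : ∃ k, m = k + 1 := ⟨m - 1, by omega⟩
  have h1 : ((k + 1 : Nat) : Int) = (k : Int) + 1 := by push_cast; ring
  rw [h1, pv_foldA k]
  have h2 : (k : Int) + 1 + 1 = ((k + 1 : Nat) : Int) + 1 := by push_cast; ring
  rw [pv_prodRange_eq, h2, pv_range_factorial (k + 1)]
  have h3 : ((k : Int) + 1 - 1).toNat = k := by omega
  rw [h3, pv_pow2_eq]
  dsimp only
  simp only [pv_mod_emod]
  rw [pv_mulmod]
  have hf : ((Nat.factorial k : Int) * ((k : Int) + 1)) = (Nat.factorial (k + 1) : Int) := by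
    rw [Nat.factorial_succ]; push_cast; ring
  rw [hf]
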